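-- pv_equiv track=rewrite | github.com/datanav/docs | training/powerpoints/splitter.py | summarizer2
-- ===== SOURCE A (Python) =====
-- def summarizer2(text: str):
--     output = []
--     curMain = None
--     indexer = 0
--     for line in text.split('\n'):
--         if line.startswith('  - '):
--             if len(output) > 0:
--                 indexer += 1
--             output.append(line + '\n')
--         elif line.startswith('    - '):
--             output[indexer] += line + '\n'
--     return output
-- ===== SOURCE B (Python) =====
-- def summarizer2(text: str):
--     output = []
--     pending = ''
--     for line in reversed(text.split('\n')):
--         if line.startswith('  - '):
--             output.insert(0, line + '\n' + pending)
--             pending = ''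
--         elif line.startswith('    - '):
--             pending = line + '\n' + pending
--     return output
-- ===== Notes on version B (the rewrite author's own statement) =====
-- stated objective: alternative
-- what changed: B traverses the lines in reverse with a pending-suffix accumulator, emitting each group whole when its main bullet is reached, instead of A's forward pass with an index cursor and in-place '+=' into the output list.
import Mathlib
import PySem

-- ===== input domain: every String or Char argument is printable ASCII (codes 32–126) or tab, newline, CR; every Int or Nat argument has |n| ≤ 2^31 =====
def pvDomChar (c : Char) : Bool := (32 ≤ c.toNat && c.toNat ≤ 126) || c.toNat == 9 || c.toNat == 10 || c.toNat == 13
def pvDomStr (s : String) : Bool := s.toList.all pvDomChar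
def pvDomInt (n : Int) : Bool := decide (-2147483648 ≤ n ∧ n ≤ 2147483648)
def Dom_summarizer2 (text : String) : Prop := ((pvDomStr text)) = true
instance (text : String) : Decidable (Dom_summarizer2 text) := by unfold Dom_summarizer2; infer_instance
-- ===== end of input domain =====

-- B traverses the lines in reverse with a pending-suffix accumulator, emitting each group whole
-- at its main bullet, instead of A's forward pass with an index cursor and in-place '+='.

-- ===== PORT A =====
-- the loop over text.split('\n'); state = (output, indexer); 'none' = the IndexError of
-- output[indexer] when a '    - ' line precedes any '  - ' line (excluded by Pre_).
-- (A's variable curMain is never used and is dropped.)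
def summarizer2Loop : List String → List String → Int → Option (List String)
  | [], output, _ => some output
  | line :: rest, output, indexer =>
    if PySem.Str.startswith line "  - " then
      summarizer2Loop rest (output ++ [line ++ "\n"])
        (if PySem.List.len output > 0 then indexer + 1 else indexer)
    else if PySem.Str.startswith line "    - " then
      match PySem.List.pyGet? output indexer with
      | none => none                    -- IndexError
      | some cur => summarizer2Loop rest (PySem.List.pySetD output indexer (cur ++ line ++ "\n")) indexer
    else
      summarizer2Loop rest output indexer

def summarizer2 (text : String) : List String :=
  -- text.split('\n'): sep is the nonempty "\n", so split? never raises and .getD [] is exact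
  (summarizer2Loop ((PySem.Str.split? text "\n").getD []) [] 0).getD []

-- ===== PORT B =====
-- the loop over reversed(text.split('\n')); state = (output, pending); insert(0, s) = cons
def summarizer2AltLoop : List String → List String → String → List String
  | [], output, _ => output
  | line :: rest, output, pending =>
    if PySem.Str.startswith line "  - " then
      summarizer2AltLoop rest ((line ++ "\n" ++ pending) :: output) ""
    else if PySem.Str.startswith line "    - " then
      summarizer2AltLoop rest output (line ++ "\n" ++ pending)
    else
      summarizer2AltLoop rest output pending

def summarizer2_alt (text : String) : List String :=
  summarizer2AltLoop (((PySem.Str.split? text "\n").getD []).reverse) [] ""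

-- ===== PRECONDITION & SPEC =====
-- Pre_ excludes exactly the inputs where a '    - ' sub-bullet line occurs before any '  - '
-- main-bullet line: there the Python A raises IndexError (B drops those orphan sub-lines).
def Pre_summarizer2 (text : String) : Prop :=
  ∀ j < ((PySem.Str.split? text "\n").getD []).length,
    PySem.Str.startswith (((PySem.Str.split? text "\n").getD []).getD j "") "    - " = true →
    ∃ i < j, PySem.Str.startswith (((PySem.Str.split? text "\n").getD []).getD i "") "  - " = true
instance (text : String) : Decidable (Pre_summarizer2 text) := by unfold Pre_summarizer2; infer_instance

def pvWitness_summarizer2 : String := "  - a\n    - b\nx"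

def Spec_summarizer2 (text : String) (out : List String) : Prop := out = summarizer2_alt text
instance (text : String) (out : List String) : Decidable (Spec_summarizer2 text out) := by unfold Spec_summarizer2; infer_instance

-- ===== CLAIM (what is proved, stated in full; the proofs are below) =====
def Claim_equal_summarizer2 : Prop := ∀ (text : String), Dom_summarizer2 text → Pre_summarizer2 text → Spec_summarizer2 text (summarizer2 text)

-- ===== LEMMAS AND PROOFS =====

-- one backward step: both programs' grouping is characterised by the right fold of this step
def pvStep (l : String) (acc : List String × String) : List String × String :=
  if PySem.Str.startswith l "  - " then ((l ++ "\n" ++ acc.2) :: acc.1, "")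
  else if PySem.Str.startswith l "    - " then (acc.1, l ++ "\n" ++ acc.2)
  else acc

theorem pvStep_main (l : String) (acc : List String × String)
    (h1 : PySem.Str.startswith l "  - " = true) :
    pvStep l acc = ((l ++ "\n" ++ acc.2) :: acc.1, "") := by
  unfold pvStep; rw [if_pos h1]

theorem pvStep_sub (l : String) (acc : List String × String)
    (h1 : ¬ PySem.Str.startswith l "  - " = true)
    (h2 : PySem.Str.startswith l "    - " = true) :
    pvStep l acc = (acc.1, l ++ "\n" ++ acc.2) := by
  unfold pvStep; rw [if_neg h1, if_pos h2]

theorem pvStep_other (l : String) (acc : List String × String)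
    (h1 : ¬ PySem.Str.startswith l "  - " = true)
    (h2 : ¬ PySem.Str.startswith l "    - " = true) :
    pvStep l acc = acc := by
  unfold pvStep; rw [if_neg h1, if_neg h2]

-- groups in the fold's base pass through untouched (pvStep only conses onto the group list)
theorem pvFoldrBase (ls : List String) (gs : List String) (t : String) :
    ls.foldr pvStep (gs, t)
      = ((ls.foldr pvStep ([], t)).1 ++ gs, (ls.foldr pvStep ([], t)).2) := by
  induction ls with
  | nil => simp
  | cons l ls ih =>
    simp only [List.foldr_cons, ih, pvStep]
    split_ifs <;> simp

-- B's loop over the reversed list computes the right fold of pvStep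
theorem pvAltLoopEq (rs : List String) : ∀ (output : List String) (pending : String),
    summarizer2AltLoop rs output pending
      = (rs.reverse.foldr pvStep ([], pending)).1 ++ output := by
  induction rs with
  | nil => intro output pending; simp [summarizer2AltLoop]
  | cons r rs ih =>
    intro output pending
    have hrev : (r :: rs).reverse.foldr pvStep (([], pending) : List String × String)
        = rs.reverse.foldr pvStep (pvStep r ([], pending)) := by
      rw [List.reverse_cons, List.foldr_append, List.foldr_cons, List.foldr_nil]
    rw [hrev]
    by_cases h1 : PySem.Str.startswith r "  - " = true
    · rw [summarizer2AltLoop, if_pos h1, ih, pvStep_main r _ h1]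
      rw [pvFoldrBase rs.reverse [r ++ "\n" ++ pending] ""]
      simp
    · by_cases h2 : PySem.Str.startswith r "    - " = true
      · rw [summarizer2AltLoop, if_neg h1, if_pos h2, ih, pvStep_sub r _ h1 h2]
      · rw [summarizer2AltLoop, if_neg h1, if_neg h2, ih, pvStep_other r _ h1 h2]

-- A's loop invariant: once the output is nonempty (cursor on the last group), the final
-- output is the earlier groups plus the fold's groups, the pending tail glued onto g
theorem pvLoopInv (ls : List String) : ∀ (gs : List String) (g : String),
    summarizer2Loop ls (gs ++ [g]) (gs.length : Int)
      = some (gs ++ (g ++ (ls.foldr pvStep ([], "")).2) :: (ls.foldr pvStep ([], "")).1) := by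
  induction ls with
  | nil => intro gs g; simp [summarizer2Loop]
  | cons l ls ih =>
    intro gs g
    by_cases h1 : PySem.Str.startswith l "  - " = true
    · rw [summarizer2Loop, if_pos h1, if_pos (by simp [PySem.List.len_eq])]
      have hlen : ((gs.length : Int) + 1) = (((gs ++ [g]).length : Nat) : Int) := by simp
      rw [show gs ++ [g] ++ [l ++ "\n"] = (gs ++ [g]) ++ [l ++ "\n"] from rfl, hlen,
        ih (gs ++ [g]) (l ++ "\n")]
      rw [List.foldr_cons, pvStep_main l _ h1]
      simp [String.append_assoc]
    · by_cases h2 : PySem.Str.startswith l "    - " = true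
      · rw [summarizer2Loop, if_neg h1, if_pos h2]
        have hget : PySem.List.pyGet? (gs ++ [g]) (gs.length : Int) = some g := by
          simpa using PySem.List.pyGet?_append_length gs ([] : List String) g
        rw [hget]
        have hset : PySem.List.pySetD (gs ++ [g]) (gs.length : Int) (g ++ l ++ "\n")
            = gs ++ [g ++ l ++ "\n"] := by
          rw [PySem.List.pySetD_natCast]
          simp
        dsimp only
        rw [hset, ih gs (g ++ l ++ "\n")]
        rw [List.foldr_cons, pvStep_sub l _ h1 h2]
        simp [String.append_assoc]
      · rw [summarizer2Loop, if_neg h1, if_neg h2, ih gs g]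
        rw [List.foldr_cons, pvStep_other l _ h1 h2]

-- the list-level precondition: no sub-bullet line before the first main-bullet line
def pvPreL (ls : List String) : Prop :=
  ∀ j < ls.length, PySem.Str.startswith (ls.getD j "") "    - " = true →
    ∃ i < j, PySem.Str.startswith (ls.getD i "") "  - " = true

theorem pvPreLTail (l : String) (ls : List String)
    (hm : ¬ PySem.Str.startswith l "  - " = true) (h : pvPreL (l :: ls)) : pvPreL ls := by
  intro j hj hs
  obtain ⟨i, hi, hmi⟩ := h (j + 1) (by simpa using hj) (by simpa using hs)
  match i, hi with
  | 0, _ => exact absurd (by simpa using hmi) hm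
  | i + 1, hi => exact ⟨i, by omega, by simpa using hmi⟩

-- the pre-phase: before the first main bullet, under pvPreL, A skips every line
theorem pvLoopPre (ls : List String) (h : pvPreL ls) :
    summarizer2Loop ls [] 0 = some ((ls.foldr pvStep ([], "")).1) := by
  induction ls with
  | nil => simp [summarizer2Loop]
  | cons l ls ih =>
    by_cases h1 : PySem.Str.startswith l "  - " = true
    · rw [summarizer2Loop, if_pos h1, if_neg (by simp [PySem.List.len_eq])]
      have hi := pvLoopInv ls [] (l ++ "\n")
      simp only [List.nil_append, List.length_nil, Nat.cast_zero] at hi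
      rw [List.nil_append, hi, List.foldr_cons, pvStep_main l _ h1]
    · by_cases h2 : PySem.Str.startswith l "    - " = true
      · exfalso
        obtain ⟨i, hi, _⟩ := h 0 (by simp) (by simpa using h2)
        omega
      · rw [summarizer2Loop, if_neg h1, if_neg h2, ih (pvPreLTail l ls h1 h)]
        rw [List.foldr_cons, pvStep_other l _ h1 h2]

-- ===== VERDICT (by name: the statement is the Claim_ definition above) =====
theorem summarizer2_spec : Claim_equal_summarizer2 := by
  intro text _ hpre
  unfold Spec_summarizer2 summarizer2 summarizer2_alt
  rw [pvAltLoopEq, pvLoopPre _ hpre]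
  simp
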